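-- pv_equiv track=rewrite | github.com/AlexandreLEGAL/IUT | PycharmProjects/SDD_Python/TP4.py | peutSurvivre
-- ===== SOURCE A (Python) =====
-- def peutSurvivre(regimeAlimentaire, nourritureDisponible):
--     res = {}
--     for (lieu, liste_al) in nourritureDisponible.items():
--         if lieu not in res.keys():
--             res[lieu] = set()
--         for (animal, enssemble_nourriture) in regimeAlimentaire.items():
--             for nourriture in enssemble_nourriture:
--                 if nourriture in liste_al:
--                     if animal not in res[lieu]:
--                         res[lieu].add(animal)
--     return res
-- ===== SOURCE B (Python) =====
-- def peutSurvivre(regimeAlimentaire, nourritureDisponible):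
--     animals = list(regimeAlimentaire)
--     mange = {}  # inverted index: food -> indices of the animals that eat it
--     for i, regime in enumerate(regimeAlimentaire.values()):
--         for food in regime:
--             mange.setdefault(food, []).append(i)
--     res = {}
--     for lieu, liste_al in nourritureDisponible.items():
--         alive = [False] * len(animals)
--         for food in liste_al:
--             for i in mange.get(food, []):
--                 alive[i] = True
--         res[lieu] = {animals[i] for i, ok in enumerate(alive) if ok}
--     return res
-- ===== Notes on version B (the rewrite author's own statement) =====
-- stated objective: faster
-- what changed: A's per-location triple nested rescan of every animal and diet is replaced by a one-pass inverted index (food -> list of animal indices) plus, per location, a boolean survivor mask filled by posting-list lookups and read out once in index order.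
import Mathlib
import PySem

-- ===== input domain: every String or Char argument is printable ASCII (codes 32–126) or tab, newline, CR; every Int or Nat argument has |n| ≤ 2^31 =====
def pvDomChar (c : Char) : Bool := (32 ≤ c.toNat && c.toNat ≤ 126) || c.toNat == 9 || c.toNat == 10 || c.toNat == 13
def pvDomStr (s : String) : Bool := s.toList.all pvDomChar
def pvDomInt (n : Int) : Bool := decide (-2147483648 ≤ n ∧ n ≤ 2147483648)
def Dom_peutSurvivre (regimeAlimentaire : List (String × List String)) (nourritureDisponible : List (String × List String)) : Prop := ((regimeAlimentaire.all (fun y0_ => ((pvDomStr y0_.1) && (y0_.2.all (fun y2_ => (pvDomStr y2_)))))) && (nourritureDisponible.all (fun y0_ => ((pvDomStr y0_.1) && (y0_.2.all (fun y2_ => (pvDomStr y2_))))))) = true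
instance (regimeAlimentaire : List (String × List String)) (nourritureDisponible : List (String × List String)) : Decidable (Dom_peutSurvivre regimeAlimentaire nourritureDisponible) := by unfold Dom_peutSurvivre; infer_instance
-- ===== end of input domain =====

-- B replaces A's per-location triple nested rescan by a one-pass inverted index (food -> animal
-- indices) plus a per-location boolean survivor mask, read out once in index order (faster).

-- ===== PORT A =====
def peutSurvivre (regimeAlimentaire : List (String × List String)) (nourritureDisponible : List (String × List String)) : List (String × List String) :=
  let res : PySem.Dict String (PySem.Set String) :=
    nourritureDisponible.foldl (fun res p =>
      let lieu := p.1
      let liste_al := p.2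
      let res := if res.keys.contains lieu then res else res.insert lieu PySem.Set.empty
      regimeAlimentaire.foldl (fun res q =>
        let animal := q.1
        q.2.foldl (fun res nourriture =>
          if liste_al.contains nourriture then
            if PySem.Set.contains (res.getD lieu PySem.Set.empty) animal then res
            else res.modify lieu PySem.Set.empty (fun s => PySem.Set.add s animal)
          else res) res) res) PySem.Dict.empty
  res.items

-- ===== PORT B =====
def peutSurvivre_alt (regimeAlimentaire : List (String × List String)) (nourritureDisponible : List (String × List String)) : List (String × List String) :=
  let animals := regimeAlimentaire.map (·.1)
  -- inverted index: food -> indices of the animals that eat it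
  let mange : PySem.Dict String (List Int) :=
    (PySem.List.enumerate (regimeAlimentaire.map (·.2)) 0).foldl
      (fun d p => p.2.foldl (fun d food => d.modify food [] (fun l => l ++ [p.1])) d)
      PySem.Dict.empty
  let res : PySem.Dict String (PySem.Set String) :=
    nourritureDisponible.foldl (fun res p =>
      let alive := List.replicate animals.length false
      let alive := p.2.foldl (fun alive food =>
          (mange.getD food []).foldl (fun alive i => PySem.List.pySetD alive i true) alive) alive
      res.insert p.1 (PySem.Set.ofList
        (((PySem.List.enumerate alive 0).filter (fun q => q.2)).map
          (fun q => PySem.List.pyGetD animals q.1 ""))))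
      PySem.Dict.empty
  res.items

-- ===== PRECONDITION & SPEC =====
-- Pre_ excludes association lists whose nourritureDisponible keys contain duplicates: those do not
-- represent a Python dict (A's parameter is a dict, whose keys are necessarily distinct), and on that
-- encoding artefact A's accumulate-vs-overwrite behaviour is unspecified.
def Pre_peutSurvivre (regimeAlimentaire : List (String × List String)) (nourritureDisponible : List (String × List String)) : Prop :=
  (nourritureDisponible.map Prod.fst).Nodup
instance (regimeAlimentaire : List (String × List String)) (nourritureDisponible : List (String × List String)) : Decidable (Pre_peutSurvivre regimeAlimentaire nourritureDisponible) := by unfold Pre_peutSurvivre; infer_instance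

def pvWitness_peutSurvivre : (List (String × List String)) × (List (String × List String)) :=
  ([("cow", ["grass"]), ("fox", ["hen", "mouse"])],
   [("forest", ["mouse", "grass"]), ("desert", [])])

def Spec_peutSurvivre (regimeAlimentaire : List (String × List String)) (nourritureDisponible : List (String × List String)) (out : List (String × List String)) : Prop := out = peutSurvivre_alt regimeAlimentaire nourritureDisponible
instance (regimeAlimentaire : List (String × List String)) (nourritureDisponible : List (String × List String)) (out : List (String × List String)) : Decidable (Spec_peutSurvivre regimeAlimentaire nourritureDisponible out) := by unfold Spec_peutSurvivre; infer_instance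

-- ===== CLAIM (what is proved, stated in full; the proofs are below) =====
def Claim_equal_peutSurvivre : Prop := ∀ (regimeAlimentaire : List (String × List String)) (nourritureDisponible : List (String × List String)), Dom_peutSurvivre regimeAlimentaire nourritureDisponible → Pre_peutSurvivre regimeAlimentaire nourritureDisponible → Spec_peutSurvivre regimeAlimentaire nourritureDisponible (peutSurvivre regimeAlimentaire nourritureDisponible)

-- ===== LEMMAS AND PROOFS =====

-- the per-location value both programs compute: survivors of al, in regime order, first occurrences
def pvLoc (ra : List (String × List String)) (al : List String) : PySem.Set String :=
  PySem.Set.ofList ((ra.filter (fun q => q.2.any (fun f => al.contains f))).map (·.1))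

-- ---- A side ----

-- a guarded add equals add (Set.add already checks membership)
theorem pv_cond_add {s : PySem.Set String} {a : String} :
    (if PySem.Set.contains s a = true then s else PySem.Set.add s a) = PySem.Set.add s a := by
  by_cases h : PySem.Set.contains s a = true
  · rw [if_pos h]
    simp only [PySem.Set.add, PySem.Set.contains] at h ⊢
    rw [if_pos h]
  · rw [if_neg h]

theorem pv_mem_add (s : PySem.Set String) (a : String) :
    PySem.Set.contains (PySem.Set.add s a) a = true := by
  simp only [PySem.Set.add, PySem.Set.contains]
  split_ifs with h
  · exact h
  · simp

theorem pv_add_add (s : PySem.Set String) (a : String) :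
    PySem.Set.add (PySem.Set.add s a) a = PySem.Set.add s a := by
  conv_lhs => rw [PySem.Set.add]
  split_ifs with hc
  · rfl
  · exact absurd (pv_mem_add s a) hc

-- A's innermost diet loop over one animal, acting on the set, equals one conditional add
theorem pv_diet_fold (al : List String) (animal : String) :
    ∀ (diet : List String) (s : PySem.Set String),
      diet.foldl (fun s f => if al.contains f then
          (if PySem.Set.contains s animal then s else PySem.Set.add s animal) else s) s
      = if diet.any (fun f => al.contains f) then PySem.Set.add s animal else s := by
  intro diet
  induction diet with
  | nil => intro s; simp
  | cons f rest ih =>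
    intro s
    rw [List.foldl_cons, List.any_cons]
    by_cases h : al.contains f = true
    · rw [if_pos h, ih, pv_cond_add]
      rw [h, Bool.true_or, if_pos rfl]
      by_cases h2 : (rest.any fun f => al.contains f) = true
      · rw [if_pos h2, pv_add_add]
      · rw [if_neg h2]
    · rw [if_neg h, ih]
      rw [Bool.eq_false_iff.2 h, Bool.false_or]

-- A's animal loop threading a set equals folding conditional adds of the filtered animal list
theorem pv_animal_fold (al : List String) :
    ∀ (ra : List (String × List String)) (s : PySem.Set String),
      ra.foldl (fun s q => if q.2.any (fun f => al.contains f) then PySem.Set.add s q.1 else s) s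
      = ((ra.filter (fun q => q.2.any (fun f => al.contains f))).map (·.1)).foldl PySem.Set.add s := by
  intro ra
  induction ra with
  | nil => intro s; rfl
  | cons q rest ih =>
    intro s
    rw [List.foldl_cons, List.filter_cons]
    by_cases h : (q.2.any fun f => al.contains f) = true
    · rw [if_pos h, if_pos h, List.map_cons, List.foldl_cons, ih]
    · rw [if_neg h, if_neg h, ih]

theorem pv_loc_eq_fold (ra : List (String × List String)) (al : List String) :
    pvLoc ra al
      = ra.foldl (fun s q => if q.2.any (fun f => al.contains f) then PySem.Set.add s q.1 else s)
          PySem.Set.empty := by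
  rw [pvLoc, PySem.Set.ofList_eq_foldl, ← pv_animal_fold]
  rfl

-- on a dict where lieu maps to s, one diet loop of A only rewrites that slot
theorem pv_diet_dict (al : List String) (lieu animal : String)
    (d : PySem.Dict String (PySem.Set String)) :
    ∀ (diet : List String) (s : PySem.Set String),
      diet.foldl (fun res nourriture =>
          if al.contains nourriture then
            if PySem.Set.contains (res.getD lieu PySem.Set.empty) animal then res
            else res.modify lieu PySem.Set.empty (fun t => PySem.Set.add t animal)
          else res) (d.insert lieu s)
      = d.insert lieu
          (diet.foldl (fun s f => if al.contains f then
              (if PySem.Set.contains s animal then s else PySem.Set.add s animal) else s) s) := by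
  intro diet
  induction diet with
  | nil => intro s; rfl
  | cons f rest ih =>
    intro s
    rw [List.foldl_cons, List.foldl_cons]
    by_cases h : al.contains f = true
    · rw [if_pos h, if_pos h, PySem.Dict.getD_insert_self]
      by_cases h2 : PySem.Set.contains s animal = true
      · rw [if_pos h2, if_pos h2]
        exact ih s
      · have hm : (d.insert lieu s).modify lieu PySem.Set.empty (fun t => PySem.Set.add t animal)
            = d.insert lieu (PySem.Set.add s animal) := by
          simp only [PySem.Dict.modify, PySem.Dict.getD_insert_self, PySem.Dict.insert_insert_self]
        rw [if_neg h2, if_neg h2, hm]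
        exact ih _
    · rw [if_neg h, if_neg h]
      exact ih s

-- A's per-location double loop on a dict where lieu was just inserted acts only on that slot
theorem pv_inner_dict (ra : List (String × List String)) (al : List String) (lieu : String)
    (d : PySem.Dict String (PySem.Set String)) :
    ∀ (s : PySem.Set String),
      ra.foldl (fun res q =>
        q.2.foldl (fun res nourriture =>
          if al.contains nourriture then
            if PySem.Set.contains (res.getD lieu PySem.Set.empty) q.1 then res
            else res.modify lieu PySem.Set.empty (fun t => PySem.Set.add t q.1)
          else res) res) (d.insert lieu s)
      = d.insert lieu
          (ra.foldl (fun s q => if q.2.any (fun f => al.contains f) then PySem.Set.add s q.1 else s) s) := by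
  induction ra with
  | nil => intro s; rfl
  | cons q rest ih =>
    intro s
    simp only [List.foldl_cons]
    rw [pv_diet_dict al lieu q.1 d q.2 s, pv_diet_fold al q.1 q.2 s]
    exact ih _

-- A's outer loop builds the dict of pvLoc values when the pending location keys are fresh and distinct
theorem pv_outer (ra : List (String × List String)) :
    ∀ (nd : List (String × List String)) (d : PySem.Dict String (PySem.Set String)),
      (nd.map Prod.fst).Nodup → (∀ k ∈ nd.map Prod.fst, k ∉ d.keys) →
      nd.foldl (fun res p =>
        ra.foldl (fun res q =>
          q.2.foldl (fun res nourriture =>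
            if p.2.contains nourriture then
              if PySem.Set.contains (res.getD p.1 PySem.Set.empty) q.1 then res
              else res.modify p.1 PySem.Set.empty (fun t => PySem.Set.add t q.1)
            else res) res)
          (if res.keys.contains p.1 then res else res.insert p.1 PySem.Set.empty)) d
      = nd.foldl (fun d p => d.insert p.1 (pvLoc ra p.2)) d := by
  intro nd
  induction nd with
  | nil => intro d _ _; rfl
  | cons p rest ih =>
    intro d hnd hfresh
    have hnd' : p.1 ∉ rest.map Prod.fst ∧ (rest.map Prod.fst).Nodup := by
      rw [List.map_cons, List.nodup_cons] at hnd
      exact hnd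
    have hmem : p.1 ∉ d.keys := hfresh p.1 (by simp)
    have hkc : ¬ (d.keys.contains p.1 = true) := by
      intro hc
      exact hmem (by simpa [List.contains_iff_mem] using hc)
    have hdc : d.contains p.1 = false := by
      rw [Bool.eq_false_iff]
      intro hc
      exact hmem ((PySem.Dict.contains_iff_mem_keys d p.1).1 hc)
    simp only [List.foldl_cons]
    rw [if_neg hkc, pv_inner_dict ra p.2 p.1 d PySem.Set.empty, ← pv_loc_eq_fold ra p.2]
    apply ih
    · exact hnd'.2
    · intro k hk
      rw [PySem.Dict.keys_insert_of_not_contains d _ hdc]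
      simp only [List.mem_append, List.mem_singleton]
      rintro (h | h)
      · exact hfresh k (by rw [List.map_cons]; exact List.mem_cons_of_mem _ hk) h
      · subst h
        exact hnd'.1 hk

-- ---- B side ----

-- nested index-building loop flattened into one fold over (food, index) pairs
theorem pv_mange_flat (L : List (Int × List String)) :
    ∀ (d : PySem.Dict String (List Int)),
      L.foldl (fun d p => p.2.foldl (fun d food => d.modify food [] (fun l => l ++ [p.1])) d) d
      = (L.flatMap (fun p => p.2.map (fun food => (food, p.1)))).foldl
          (fun d q => d.modify q.1 [] (fun l => l ++ [q.2])) d := by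
  induction L with
  | nil => intro d; rfl
  | cons p rest ih =>
    intro d
    rw [List.foldl_cons, List.flatMap_cons, List.foldl_append, ih, List.foldl_map]

-- what the inverted index stores under food f, via the flat fold
theorem pv_mange_getD (ra : List (String × List String)) (f : String) :
    ((PySem.List.enumerate (ra.map (·.2)) 0).foldl
        (fun d p => p.2.foldl (fun d food => d.modify food [] (fun l => l ++ [p.1])) d)
        PySem.Dict.empty).getD f []
    = (((PySem.List.enumerate (ra.map (·.2)) 0).flatMap
          (fun p => p.2.map (fun food => (food, p.1)))).filter (fun q => q.1 == f)).map (·.2) := by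
  rw [pv_mange_flat, PySem.Dict.getD_foldl_modify_append, PySem.Dict.getD_empty]
  rfl

-- membership in a posting list
theorem pv_mem_mange (ra : List (String × List String)) (f : String) (i : Int) :
    i ∈ ((PySem.List.enumerate (ra.map (·.2)) 0).foldl
        (fun d p => p.2.foldl (fun d food => d.modify food [] (fun l => l ++ [p.1])) d)
        PySem.Dict.empty).getD f []
    ↔ ∃ (k : Nat) (h : k < ra.length), i = (k : Int) ∧ f ∈ (ra[k]).2 := by
  rw [pv_mange_getD]
  simp only [List.mem_map, List.mem_filter, List.mem_flatMap, PySem.List.mem_enumerate_iff,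
    beq_iff_eq]
  constructor
  · rintro ⟨q, ⟨⟨p, ⟨k, hk, rfl⟩, hq⟩, hf⟩, rfl⟩
    simp only [List.getElem_map, List.length_map] at hk hq
    obtain ⟨food, hfood, rfl⟩ := hq
    subst hf
    exact ⟨k, by simpa using hk, by simp, hfood⟩
  · rintro ⟨k, hk, rfl, hf⟩
    refine ⟨(f, (0:Int) + (k:Int)),
      ⟨⟨((0:Int) + (k:Int), ra[k].2), ⟨k, by simpa using hk, by simp⟩, ⟨f, hf, rfl⟩⟩, rfl⟩, by simp⟩

-- the posting-list marking loop, characterised pointwise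
theorem pv_setfold (P : List Int) :
    ∀ (a : List Bool), (∀ i ∈ P, 0 ≤ i ∧ i < (a.length : Int)) →
      (P.foldl (fun a i => PySem.List.pySetD a i true) a).length = a.length ∧
      ∀ j : Nat, (P.foldl (fun a i => PySem.List.pySetD a i true) a).getD j false
        = (a.getD j false || P.contains (j : Int)) := by
  induction P with
  | nil => intro a _; simp
  | cons i rest ih =>
    intro a h
    obtain ⟨hi0, hin⟩ := h i (by simp)
    have hset : PySem.List.pySetD a i true = a.set i.toNat true :=
      PySem.List.pySetD_of_nonneg a true hi0
    have hlen : (a.set i.toNat true).length = a.length := by simp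
    have h' : ∀ x ∈ rest, 0 ≤ x ∧ x < ((a.set i.toNat true).length : Int) := by
      intro x hx; rw [hlen]; exact h x (List.mem_cons_of_mem _ hx)
    obtain ⟨ihlen, ihget⟩ := ih (a.set i.toNat true) h'
    rw [List.foldl_cons, hset]
    refine ⟨by rw [ihlen, hlen], ?_⟩
    intro j
    rw [ihget j]
    by_cases hji : (j : Int) = i
    · have : (a.set i.toNat true).getD j false = true := by
        have : i.toNat = j := by omega
        rw [this]
        rw [List.getD_eq_getElem?_getD, List.getElem?_set_self (by omega)]
        simp
      rw [this]
      simp [hji.symm]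
    · have : (a.set i.toNat true).getD j false = a.getD j false := by
        rw [List.getD_eq_getElem?_getD, List.getD_eq_getElem?_getD,
          List.getElem?_set_ne (by omega)]
      rw [this]
      simp [hji]

-- the per-location food loop, characterised pointwise
theorem pv_alivefold (al : List String) (mget : String → List Int) (n : Nat)
    (hm : ∀ f, ∀ i ∈ mget f, 0 ≤ i ∧ i < (n : Int)) :
    ∀ (a : List Bool), a.length = n →
      (al.foldl (fun a f => (mget f).foldl (fun a i => PySem.List.pySetD a i true) a) a).length = n ∧
      ∀ j : Nat, (al.foldl (fun a f => (mget f).foldl (fun a i => PySem.List.pySetD a i true) a) a).getD j false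
        = (a.getD j false || al.any (fun f => (mget f).contains (j : Int))) := by
  induction al with
  | nil => intro a ha; simp [ha]
  | cons f rest ih =>
    intro a ha
    obtain ⟨hlen1, hget1⟩ := pv_setfold (mget f) a (by intro i hi; rw [ha]; exact hm f i hi)
    obtain ⟨ihlen, ihget⟩ := ih _ (hlen1.trans ha)
    rw [List.foldl_cons]
    refine ⟨ihlen, ?_⟩
    intro j
    rw [ihget j, hget1 j, List.any_cons]
    cases a.getD j false <;> cases (mget f).contains (j:Int) <;> simp

-- the final mask equals the per-animal survival flags, in animal order
theorem pv_alive_eq (ra : List (String × List String)) (al : List String) :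
    al.foldl (fun a f =>
        (((PySem.List.enumerate (ra.map (·.2)) 0).foldl
            (fun d p => p.2.foldl (fun d food => d.modify food [] (fun l => l ++ [p.1])) d)
            PySem.Dict.empty).getD f []).foldl (fun a i => PySem.List.pySetD a i true) a)
      (List.replicate (ra.map (·.1)).length false)
    = ra.map (fun q => q.2.any (fun f => al.contains f)) := by
  have hm : ∀ f, ∀ i ∈ ((PySem.List.enumerate (ra.map (·.2)) 0).foldl
      (fun d p => p.2.foldl (fun d food => d.modify food [] (fun l => l ++ [p.1])) d)
      PySem.Dict.empty).getD f [], 0 ≤ i ∧ i < (ra.length : Int) := by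
    intro f i hi
    obtain ⟨k, hk, rfl, _⟩ := (pv_mem_mange ra f i).1 hi
    constructor <;> [positivity; exact_mod_cast hk]
  obtain ⟨hlen, hget⟩ := pv_alivefold al _ ra.length hm
    (List.replicate (ra.map (·.1)).length false) (by simp)
  apply List.ext_getElem (by have h := hlen; simp only [List.length_map] at h ⊢; exact h)
  intro j hj1 hj2
  have hjn : j < ra.length := by simpa using hj2
  have h1 : _ = _ := hget j
  rw [List.getD_eq_getElem _ _ hj1] at h1
  rw [h1]
  have hrep : (List.replicate (ra.map (·.1)).length false).getD j false = false := by
    simp [List.getD_eq_getElem?_getD]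
  rw [hrep, Bool.false_or, List.getElem_map]
  have hmem : ∀ f : String, ((j : Nat) : Int) ∈ ((PySem.List.enumerate (ra.map (·.2)) 0).foldl
      (fun d p => p.2.foldl (fun d food => d.modify food [] (fun l => l ++ [p.1])) d)
      PySem.Dict.empty).getD f [] ↔ f ∈ ra[j].2 := by
    intro f
    rw [pv_mem_mange]
    constructor
    · rintro ⟨k, hk, hjk, hf⟩
      have : j = k := by exact_mod_cast hjk
      subst this
      exact hf
    · intro hf
      exact ⟨j, hjn, rfl, hf⟩
  rw [Bool.eq_iff_iff]
  simp only [List.any_eq_true, List.contains_eq_mem, decide_eq_true_eq, hmem]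
  constructor
  · rintro ⟨f, hfa, hfd⟩; exact ⟨f, hfd, hfa⟩
  · rintro ⟨f, hfd, hfa⟩; exact ⟨f, hfa, hfd⟩

-- enumerate of a mapped list
theorem pv_enumerate_map {α β : Type} (g : α → β) :
    ∀ (l : List α) (s : Int),
      PySem.List.enumerate (l.map g) s = (PySem.List.enumerate l s).map (fun p => (p.1, g p.2)) := by
  intro l
  induction l with
  | nil => intro s; rfl
  | cons x rest ih =>
    intro s
    rw [List.map_cons, PySem.List.enumerate_cons, PySem.List.enumerate_cons, List.map_cons, ih]

-- dropping the indices of a filtered enumeration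
theorem pv_enum_filter_snd {α : Type} (c : α → Bool) :
    ∀ (l : List α) (s : Int),
      ((PySem.List.enumerate l s).filter (fun p => c p.2)).map (·.2) = l.filter c := by
  intro l
  induction l with
  | nil => intro s; rfl
  | cons x rest ih =>
    intro s
    rw [PySem.List.enumerate_cons, List.filter_cons, List.filter_cons]
    by_cases h : c x = true
    · simp [h, ih]
    · simp [h, ih]

-- reading the mask out in index order gives the filtered animal list
theorem pv_extract (ra : List (String × List String)) (c : (String × List String) → Bool) :
    ((PySem.List.enumerate (ra.map c) 0).filter (fun q => q.2)).map
        (fun q => PySem.List.pyGetD (ra.map (·.1)) q.1 "")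
    = (ra.filter c).map (·.1) := by
  rw [pv_enumerate_map, List.filter_map, List.map_map]
  simp only [Function.comp_def]
  have hcong : ((PySem.List.enumerate ra 0).filter (fun p => c p.2)).map
      (fun p => PySem.List.pyGetD (ra.map (·.1)) p.1 "")
      = ((PySem.List.enumerate ra 0).filter (fun p => c p.2)).map (fun p => p.2.1) := by
    apply List.map_congr_left
    intro p hp
    have hpe : p ∈ PySem.List.enumerate ra 0 := List.mem_of_mem_filter hp
    obtain ⟨k, hk, rfl⟩ := (PySem.List.mem_enumerate_iff ra 0 p).1 hpe
    simp only [zero_add]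
    rw [PySem.List.pyGetD_natCast]
    rw [List.getD_eq_getElem _ _ (by simpa using hk), List.getElem_map]
  rw [hcong, show (fun p : Int × (String × List String) => p.2.1)
      = (fun q : String × List String => q.1) ∘ (fun p : Int × (String × List String) => p.2) from rfl,
    ← List.map_map, pv_enum_filter_snd]

-- B's per-location value is pvLoc
theorem pv_bloc (ra : List (String × List String)) (al : List String) :
    PySem.Set.ofList
      (((PySem.List.enumerate
          (al.foldl (fun a f =>
              (((PySem.List.enumerate (ra.map (·.2)) 0).foldl
                  (fun d p => p.2.foldl (fun d food => d.modify food [] (fun l => l ++ [p.1])) d)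
                  PySem.Dict.empty).getD f []).foldl (fun a i => PySem.List.pySetD a i true) a)
            (List.replicate (ra.map (·.1)).length false)) 0).filter (fun q => q.2)).map
        (fun q => PySem.List.pyGetD (ra.map (·.1)) q.1 ""))
    = pvLoc ra al := by
  rw [pv_alive_eq, pv_extract]
  rfl

-- ===== VERDICT (by name: the statement is the Claim_ definition above) =====
theorem peutSurvivre_spec : Claim_equal_peutSurvivre := by
  intro ra nd _ hpre
  show peutSurvivre ra nd = peutSurvivre_alt ra nd
  have hA : peutSurvivre ra nd
      = (nd.foldl (fun d p => d.insert p.1 (pvLoc ra p.2)) PySem.Dict.empty).items :=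
    congrArg PySem.Dict.items
      (pv_outer ra nd PySem.Dict.empty hpre (by intro k _; simp [PySem.Dict.keys_empty]))
  have hB : peutSurvivre_alt ra nd
      = (nd.foldl (fun d p => d.insert p.1 (pvLoc ra p.2)) PySem.Dict.empty).items := by
    show (nd.foldl (fun res p => res.insert p.1 (PySem.Set.ofList
        (((PySem.List.enumerate
            (p.2.foldl (fun a f =>
                (((PySem.List.enumerate (ra.map (·.2)) 0).foldl
                    (fun d p => p.2.foldl (fun d food => d.modify food [] (fun l => l ++ [p.1])) d)
                    PySem.Dict.empty).getD f []).foldl (fun a i => PySem.List.pySetD a i true) a)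
              (List.replicate (ra.map (·.1)).length false)) 0).filter (fun q => q.2)).map
          (fun q => PySem.List.pyGetD (ra.map (·.1)) q.1 "")))) PySem.Dict.empty).items = _
    refine congrArg PySem.Dict.items (congrArg (fun f => List.foldl f PySem.Dict.empty nd) ?_)
    funext res p
    rw [pv_bloc]
  rw [hA, hB]
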